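-- pv_equiv track=rewrite | github.com/lsudersanan88/cspython | cs696/lectures/5/creative_applications(1).py | possible_proteins
-- ===== SOURCE A (Python) =====
-- def possible_proteins(amino_acids):
--     """
--     for a string of amino acids (using one letter codes), return a list of possible proteins
--     (proteins can start at any Methionine (M) and end at the first stop codon (*) )
--     EX: AYKPMVVVYYYMP*MAA  will have only two possible proteins:
--     MVVVTTTMP*   and    MP*
--     # careful using range(len())! len counts elements (1 based)
--     """
--     prots = []
--     possible = amino_acids.split('*')
--     if not amino_acids.endswith('*'):
--         possible = possible[:-1]
--     for p in possible:
--         for idx, char in enumerate(p):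
--             if char == "M":
--                 prots.append(p[idx:])
--     return prots
-- ===== SOURCE B (Python) =====
-- def possible_proteins(amino_acids):
--     # one pass: for each 'M', take the substring up to the next '*' (skip if none)
--     prots = []
--     for i, ch in enumerate(amino_acids):
--         if ch == "M":
--             j = amino_acids.find('*', i)
--             if j != -1:
--                 prots.append(amino_acids[i:j])
--     return prots
-- ===== Notes on version B (the rewrite author's own statement) =====
-- stated objective: alternative
-- what changed: B never builds the split-on-stop segment list: it scans the string once and, at each start codon, uses find of the stop from that index to emit the slice up to the next stop (start codons with no following stop are skipped), where A splits the string on stops, drops the unterminated tail segment, and enumerates every segment for starts.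
import Mathlib
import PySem

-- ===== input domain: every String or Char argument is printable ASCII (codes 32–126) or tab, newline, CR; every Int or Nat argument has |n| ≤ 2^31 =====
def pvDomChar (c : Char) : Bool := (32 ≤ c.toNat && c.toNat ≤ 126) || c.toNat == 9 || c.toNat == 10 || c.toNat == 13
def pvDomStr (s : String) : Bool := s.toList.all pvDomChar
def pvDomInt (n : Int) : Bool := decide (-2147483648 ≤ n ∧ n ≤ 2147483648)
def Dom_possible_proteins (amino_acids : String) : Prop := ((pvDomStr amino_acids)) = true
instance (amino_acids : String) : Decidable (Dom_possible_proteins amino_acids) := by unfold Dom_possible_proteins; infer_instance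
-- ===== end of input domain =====

-- B replaces A's split-on-stop/drop-unterminated-tail segment enumeration by a single scan that, at
-- each start codon, slices up to the next stop found from that position (alternative decomposition).

-- ===== PORT A =====
def possible_proteins (amino_acids : String) : List String :=
  let possible := PySem.Chars.splitOn amino_acids.toList ['*']
  let possible := if PySem.Chars.endswith amino_acids.toList ['*'] then possible
                  else PySem.List.slice possible none (some (-1))
  (possible.foldl (fun prots p =>
      (PySem.List.enumerate p).foldl (fun prots ic =>
        if ic.2 = 'M' then prots ++ [PySem.Chars.slice p (some ic.1) none] else prots) prots)
    []).map String.ofList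

-- ===== PORT B =====
def possible_proteins_alt (amino_acids : String) : List String :=
  (((PySem.List.enumerate amino_acids.toList).foldl (fun prots ic =>
      if ic.2 = 'M' then
        if PySem.Chars.findFrom amino_acids.toList ['*'] ic.1 none ≠ -1 then
          prots ++ [PySem.Chars.slice amino_acids.toList (some ic.1)
            (some (PySem.Chars.findFrom amino_acids.toList ['*'] ic.1 none))]
        else prots
      else prots)
    [])).map String.ofList

-- ===== PRECONDITION & SPEC =====
def Spec_possible_proteins (amino_acids : String) (out : List String) : Prop := out = possible_proteins_alt amino_acids
instance (amino_acids : String) (out : List String) : Decidable (Spec_possible_proteins amino_acids out) := by unfold Spec_possible_proteins; infer_instance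

-- ===== CLAIM (what is proved, stated in full; the proofs are below) =====
def Claim_equal_possible_proteins : Prop := ∀ (amino_acids : String), Dom_possible_proteins amino_acids → Spec_possible_proteins amino_acids (possible_proteins amino_acids)

-- ===== LEMMAS AND PROOFS =====

-- proof-side intermediate forms of the two ports, over List Char
def pvInner (p : List Char) : List (List Char) :=
  (PySem.List.enumerate p).flatMap (fun ic =>
    if ic.2 = 'M' then [PySem.Chars.slice p (some ic.1) none] else [])

def pvSegs (s : List Char) : List (List Char) :=
  if PySem.Chars.endswith s ['*'] then PySem.Chars.splitOn s ['*']
  else (PySem.Chars.splitOn s ['*']).dropLast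

def pvA (s : List Char) : List (List Char) := (pvSegs s).flatMap pvInner

def pvB (s : List Char) : List (List Char) :=
  (PySem.List.enumerate s).flatMap (fun ic =>
    if ic.2 = 'M' then
      if PySem.Chars.findFrom s ['*'] ic.1 none ≠ -1 then
        [PySem.Chars.slice s (some ic.1) (some (PySem.Chars.findFrom s ['*'] ic.1 none))]
      else []
    else [])

theorem portA (a : String) : possible_proteins a = (pvA a.toList).map String.ofList := by
  simp only [possible_proteins, pvA, pvSegs, PySem.List.slice_to_neg_one]
  congr 1
  have hin : ∀ (p : List Char) (acc : List (List Char)),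
      (PySem.List.enumerate p).foldl (fun prots ic =>
        if ic.2 = 'M' then prots ++ [PySem.Chars.slice p (some ic.1) none] else prots) acc
      = acc ++ pvInner p := by
    intro p acc
    unfold pvInner
    rw [← PySem.List.foldl_append_eq_flatMap]
    apply PySem.List.foldl_congr_mem
    intro acc' ic _
    by_cases h : ic.2 = 'M' <;> simp [h]
  have hout : ∀ (segs : List (List Char)),
      segs.foldl (fun prots p =>
        (PySem.List.enumerate p).foldl (fun prots ic =>
          if ic.2 = 'M' then prots ++ [PySem.Chars.slice p (some ic.1) none] else prots) prots) []
      = segs.flatMap pvInner := by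
    intro segs
    have h1 := PySem.List.foldl_congr_mem segs
      (fun prots p => (PySem.List.enumerate p).foldl (fun prots ic =>
          if ic.2 = 'M' then prots ++ [PySem.Chars.slice p (some ic.1) none] else prots) prots)
      (fun (prots : List (List Char)) p => prots ++ pvInner p) []
      (fun acc p _ => hin p acc)
    rw [h1, PySem.List.foldl_append_eq_flatMap, List.nil_append]
  split <;> rw [hout]

theorem portB (a : String) : possible_proteins_alt a = (pvB a.toList).map String.ofList := by
  unfold possible_proteins_alt pvB
  congr 1
  have h1 := PySem.List.foldl_congr_mem (PySem.List.enumerate a.toList)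
    (fun prots ic =>
      if ic.2 = 'M' then
        if PySem.Chars.findFrom a.toList ['*'] ic.1 none ≠ -1 then
          prots ++ [PySem.Chars.slice a.toList (some ic.1)
            (some (PySem.Chars.findFrom a.toList ['*'] ic.1 none))]
        else prots
      else prots)
    (fun (prots : List (List Char)) (ic : Int × Char) => prots ++ (if ic.2 = 'M' then
      if PySem.Chars.findFrom a.toList ['*'] ic.1 none ≠ -1 then
        [PySem.Chars.slice a.toList (some ic.1) (some (PySem.Chars.findFrom a.toList ['*'] ic.1 none))]
      else []
    else [])) []
    (by
      intro acc ic _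
      by_cases h : ic.2 = 'M'
      · by_cases h2 : PySem.Chars.findFrom a.toList ['*'] ic.1 none ≠ -1 <;> simp [h, h2]
      · simp [h])
  rw [h1, PySem.List.foldl_append_eq_flatMap, List.nil_append]

theorem pv_go_acc (fuel : Nat) : ∀ (l cur : List Char) (acc : List (List Char)),
    PySem.Chars.splitOn.go ['*'] fuel l cur acc
      = acc.reverse ++ PySem.Chars.splitOn.go ['*'] fuel l cur [] := by
  induction fuel with
  | zero =>
    intro l cur acc
    rw [PySem.Chars.splitOn.go.eq_def, PySem.Chars.splitOn.go.eq_def]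
    simp
  | succ f ih =>
    intro l cur acc
    cases l with
    | nil =>
      rw [PySem.Chars.splitOn.go.eq_def, PySem.Chars.splitOn.go.eq_def]
      simp
    | cons c rest =>
      rw [PySem.Chars.splitOn.go.eq_def]
      conv_rhs => rw [PySem.Chars.splitOn.go.eq_def]
      by_cases h : (['*'] : List Char).isPrefixOf (c :: rest) = true
      · simp only [h]
        simp only [if_true]
        rw [ih, ih _ _ [cur.reverse]]
        simp
      · simp only [h]
        simp only [Bool.false_eq_true, if_false]
        rw [ih]

theorem pv_go_no_star : ∀ (p : List Char), '*' ∉ p → ∀ (fuel : Nat) (cur : List Char) (acc : List (List Char)),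
    PySem.Chars.splitOn.go ['*'] fuel p cur acc = ((cur.reverse ++ p) :: acc).reverse := by
  intro p
  induction p with
  | nil =>
    intro _ fuel cur acc
    cases fuel <;> · rw [PySem.Chars.splitOn.go.eq_def]; try simp
  | cons c rest ih =>
    intro hmem fuel cur acc
    have hc : c ≠ '*' := fun h => hmem (h ▸ List.mem_cons_self)
    cases fuel with
    | zero => rw [PySem.Chars.splitOn.go.eq_def]
    | succ f =>
      rw [PySem.Chars.splitOn.go.eq_def]
      have hpre : (['*'] : List Char).isPrefixOf (c :: rest) = false := by
        simp [List.isPrefixOf, Ne.symm hc]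
      simp only [hpre, Bool.false_eq_true, if_false]
      rw [ih (fun h => hmem (List.mem_cons_of_mem _ h)) f (c :: cur) acc]
      simp

theorem pv_go_star (p : List Char) (hp : '*' ∉ p) :
    ∀ (fuel : Nat), p.length < fuel → ∀ (rest cur : List Char) (acc : List (List Char)),
    PySem.Chars.splitOn.go ['*'] fuel (p ++ '*' :: rest) cur acc
      = PySem.Chars.splitOn.go ['*'] (fuel - p.length - 1) rest [] ((cur.reverse ++ p) :: acc) := by
  induction p with
  | nil =>
    intro fuel hf rest cur acc
    cases fuel with
    | zero => omega
    | succ f =>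
      rw [PySem.Chars.splitOn.go.eq_def]
      have hpre : (['*'] : List Char).isPrefixOf ('*' :: rest) = true := by
        simp [List.isPrefixOf]
      simp [hpre]
  | cons c p' ih =>
    intro fuel hf rest cur acc
    have hc : c ≠ '*' := fun h => hp (h ▸ List.mem_cons_self)
    cases fuel with
    | zero => omega
    | succ f =>
      rw [PySem.Chars.splitOn.go.eq_def]
      have hpre : (['*'] : List Char).isPrefixOf (c :: (p' ++ '*' :: rest)) = false := by
        simp [List.isPrefixOf, Ne.symm hc]
      simp only [List.cons_append, hpre, Bool.false_eq_true, if_false]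
      rw [ih (fun h => hp (List.mem_cons_of_mem _ h)) f (by simp only [List.length_cons] at hf; omega) rest (c :: cur) acc]
      have h2 : f - p'.length - 1 = f + 1 - (c :: p').length - 1 := by simp only [List.length_cons]; omega
      rw [h2]
      simp

theorem pv_splitOn_no_star (s : List Char) (h : '*' ∉ s) :
    PySem.Chars.splitOn s ['*'] = [s] := by
  unfold PySem.Chars.splitOn
  rw [pv_go_no_star s h]
  simp

theorem pv_splitOn_star (p rest : List Char) (hp : '*' ∉ p) :
    PySem.Chars.splitOn (p ++ '*' :: rest) ['*'] = p :: PySem.Chars.splitOn rest ['*'] := by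
  unfold PySem.Chars.splitOn
  rw [pv_go_star p hp _ (by simp only [List.length_append, List.length_cons]; omega) rest [] []]
  rw [pv_go_acc]
  have h2 : (p ++ '*' :: rest).length + 1 - p.length - 1 = rest.length + 1 := by simp only [List.length_append, List.length_cons]; omega
  rw [h2]
  simp

theorem pv_decomp (s : List Char) (h : '*' ∈ s) :
    ∃ p rest, '*' ∉ p ∧ s = p ++ '*' :: rest := by
  refine ⟨s.takeWhile (fun c => !(c == '*')), (s.dropWhile (fun c => !(c == '*'))).tail, ?_, ?_⟩
  · intro hm
    have := List.mem_takeWhile_imp hm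
    simp at this
  · have hd : s.dropWhile (fun c => !(c == '*')) ≠ [] := by
      intro hnil
      rw [List.dropWhile_eq_nil_iff] at hnil
      have := hnil _ h
      simp at this
    have hh := List.head_dropWhile_not (fun c => !(c == '*')) hd
    conv_lhs => rw [← List.takeWhile_append_dropWhile (p := fun c => !(c == '*')) (l := s)]
    congr 1
    obtain ⟨x, t, hxt⟩ := List.exists_cons_of_ne_nil hd
    simp only [hxt, List.head_cons] at hh
    simp only [hxt, List.tail_cons]
    simp at hh
    rw [hh]

theorem pv_splitOn_ne_nil (s : List Char) : PySem.Chars.splitOn s ['*'] ≠ [] := by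
  by_cases h : '*' ∈ s
  · obtain ⟨p, rest, hp, rfl⟩ := pv_decomp s h
    rw [pv_splitOn_star _ _ hp]
    simp
  · rw [pv_splitOn_no_star s h]
    simp

theorem pv_prefix_singleton (c : Char) (l : List Char) : [c] <+: l ↔ l.head? = some c := by
  cases l with
  | nil => simp
  | cons x t =>
    constructor
    · rintro ⟨u, hu⟩
      simp at hu
      simp [hu.1]
    · intro h
      simp at h
      exact ⟨t, by simp [h]⟩

theorem pv_find_no_star (s : List Char) (h : '*' ∉ s) : PySem.Chars.find s ['*'] = -1 := by
  rw [PySem.Chars.find_eq_neg_one_iff]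
  intro hinf
  exact h (hinf.subset (by simp))

theorem pv_find_star (q r : List Char) (hq : '*' ∉ q) :
    PySem.Chars.find (q ++ '*' :: r) ['*'] = q.length := by
  set s := q ++ '*' :: r with hs
  have hne : PySem.Chars.find s ['*'] ≠ -1 := by
    rw [PySem.Chars.find_ne_neg_one_iff]
    exact ⟨q, r, by simp [hs]⟩
  have hge : (0 : Int) ≤ PySem.Chars.find s ['*'] := by
    have := PySem.Chars.neg_one_le_find s ['*']
    omega
  obtain ⟨hpre, hmin⟩ := PySem.Chars.find_spec hge
  rw [pv_prefix_singleton, List.head?_drop] at hpre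
  have hlow : ¬ (PySem.Chars.find s ['*']).toNat < q.length := by
    intro hlt
    have : s[(PySem.Chars.find s ['*']).toNat]? = q[(PySem.Chars.find s ['*']).toNat]? := by
      rw [hs, List.getElem?_append_left hlt]
    rw [this, List.getElem?_eq_getElem hlt] at hpre
    simp at hpre
    exact hq (hpre ▸ List.getElem_mem hlt)
  have hhigh : ¬ q.length < (PySem.Chars.find s ['*']).toNat := by
    intro hlt
    apply hmin q.length hlt
    rw [pv_prefix_singleton, List.head?_drop, hs]
    rw [List.getElem?_append_right (le_refl _)]
    simp
  omega

theorem pv_endswith_false (s : List Char) (h : '*' ∉ s) :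
    PySem.Chars.endswith s ['*'] = false := by
  rw [← Bool.not_eq_true, PySem.Chars.endswith_iff]
  intro hsuf
  exact h (hsuf.subset (by simp))

theorem pv_endswith_iff_getLast (l : List Char) :
    PySem.Chars.endswith l ['*'] = true ↔ l.getLast? = some '*' := by
  rw [PySem.Chars.endswith_iff, List.getLast?_eq_some_iff]
  constructor
  · rintro ⟨t, ht⟩; exact ⟨t, ht.symm⟩
  · rintro ⟨t, ht⟩; exact ⟨t, ht.symm⟩

theorem pv_getLast_append (p rest : List Char) (hr : rest ≠ []) :
    (p ++ '*' :: rest).getLast? = rest.getLast? := by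
  obtain ⟨x, hx⟩ := Option.isSome_iff_exists.mp (List.getLast?_isSome.mpr hr)
  rw [List.getLast?_append, show ('*' :: rest) = ['*'] ++ rest from rfl, List.getLast?_append, hx]
  simp

theorem pv_endswith_append (p rest : List Char) (hr : rest ≠ []) :
    PySem.Chars.endswith (p ++ '*' :: rest) ['*'] = PySem.Chars.endswith rest ['*'] := by
  by_cases h : PySem.Chars.endswith rest ['*'] = true
  · rw [h, pv_endswith_iff_getLast, pv_getLast_append p rest hr]
    rw [pv_endswith_iff_getLast] at h
    exact h
  · rw [Bool.not_eq_true] at h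
    rw [h, Bool.eq_false_iff]
    intro habs
    rw [pv_endswith_iff_getLast, pv_getLast_append p rest hr,
        ← pv_endswith_iff_getLast] at habs
    rw [habs] at h
    simp at h

theorem pv_flatMap_congr {α β : Type} (l : List α) (f g : α → List β)
    (h : ∀ x ∈ l, f x = g x) : l.flatMap f = l.flatMap g := by
  induction l with
  | nil => rfl
  | cons x t ih =>
    simp only [List.flatMap_cons]
    rw [h x List.mem_cons_self, ih (fun y hy => h y (List.mem_cons_of_mem _ hy))]

theorem pvInner_nil : pvInner [] = [] := by
  simp [pvInner, PySem.List.enumerate_nil]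

theorem pvA_no_star (s : List Char) (h : '*' ∉ s) : pvA s = [] := by
  unfold pvA pvSegs
  rw [pv_endswith_false s h, pv_splitOn_no_star s h]
  simp

theorem pvA_decomp (p rest : List Char) (hp : '*' ∉ p) :
    pvA (p ++ '*' :: rest) = pvInner p ++ pvA rest := by
  by_cases hr : rest = []
  · subst hr
    unfold pvA pvSegs
    rw [pv_splitOn_star p [] hp, pv_splitOn_no_star [] (by simp)]
    have he : PySem.Chars.endswith (p ++ '*' :: []) ['*'] = true := by
      rw [pv_endswith_iff_getLast]
      exact List.getLast?_concat
    rw [he, pv_endswith_false [] (by simp)]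
    simp [pvInner_nil]
  · unfold pvA pvSegs
    rw [pv_splitOn_star p rest hp, pv_endswith_append p rest hr]
    by_cases he : PySem.Chars.endswith rest ['*'] = true
    · rw [he]
      simp
    · rw [Bool.not_eq_true] at he
      rw [he]
      simp only [Bool.false_eq_true, if_false]
      rw [List.dropLast_cons_of_ne_nil (pv_splitOn_ne_nil rest)]
      simp

theorem pvB_no_star (s : List Char) (h : '*' ∉ s) : pvB s = [] := by
  unfold pvB
  rw [List.flatMap_eq_nil_iff]
  intro ic hic
  obtain ⟨k, hk, rfl⟩ := (PySem.List.mem_enumerate_iff s 0 ic).mp hic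
  by_cases hm : s[k] = 'M'
  · have hk' : (k : Nat) ≤ s.length := le_of_lt hk
    simp only [zero_add, hm]
    rw [PySem.Chars.findFrom_natCast s ['*'] k hk']
    rw [pv_find_no_star _ (fun hmem => h (List.mem_of_mem_drop hmem))]
    simp
  · simp [hm]

theorem pv_flatMap_enum_shift {β : Type} (l : List Char) (f g : Int × Char → List β) :
    ∀ (m m' : Nat),
    (∀ (k : Nat), (hk : k < l.length) → f (↑(m + k), l[k]) = g (↑(m' + k), l[k])) →
    (PySem.List.enumerate l ↑m).flatMap f = (PySem.List.enumerate l ↑m').flatMap g := by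
  induction l with
  | nil => intro m m' _; simp [PySem.List.enumerate_nil]
  | cons x t ih =>
    intro m m' h
    rw [PySem.List.enumerate_cons, PySem.List.enumerate_cons]
    simp only [List.flatMap_cons]
    have h0 := h 0 (by simp)
    simp only [Nat.add_zero, List.getElem_cons_zero] at h0
    rw [h0]
    congr 1
    have hm1 : (↑m + 1 : Int) = ↑(m + 1) := by push_cast; ring
    have hm1' : (↑m' + 1 : Int) = ↑(m' + 1) := by push_cast; ring
    rw [hm1, hm1']
    apply ih
    intro k hk
    have := h (k + 1) (by simpa using Nat.succ_lt_succ hk)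
    simpa [Nat.add_comm, Nat.add_left_comm, Nat.add_assoc] using this

theorem pvB_decomp (p rest : List Char) (hp : '*' ∉ p) :
    pvB (p ++ '*' :: rest) = pvInner p ++ pvB rest := by
  unfold pvB pvInner
  set s : List Char := p ++ '*' :: rest with hs
  rw [PySem.List.enumerate_append, PySem.List.enumerate_cons]
  rw [List.flatMap_append, List.flatMap_cons]
  have hlen : s.length = p.length + 1 + rest.length := by
    rw [hs]; simp only [List.length_append, List.length_cons]; omega
  congr 1
  -- part 1: the M's of p give exactly the per-segment suffixes of p
  · apply pv_flatMap_congr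
    intro ic hic
    obtain ⟨k, hk, rfl⟩ := (PySem.List.mem_enumerate_iff p 0 ic).mp hic
    simp only [zero_add]
    by_cases hm : p[k] = 'M'
    · simp only [hm, if_true]
      have hkp : k ≤ p.length := le_of_lt hk
      have hks : (k : Nat) ≤ s.length := by omega
      rw [PySem.Chars.findFrom_natCast s ['*'] k hks]
      have hdrop : s.drop k = p.drop k ++ '*' :: rest := by
        rw [hs, List.drop_append_of_le_length hkp]
      rw [hdrop, pv_find_star (p.drop k) rest (fun hmem => hp (List.mem_of_mem_drop hmem))]
      have hlen2 : (p.drop k).length = p.length - k := by simp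
      rw [hlen2]
      have hsum : ((k : Int) + ↑(p.length - k)) = ↑(p.length) := by omega
      have hne : ((p.length - k : Nat) : Int) ≠ -1 := by omega
      rw [if_neg (by omega : ¬ ((p.length - k : Nat) : Int) = -1)]
      rw [hsum, if_pos (by omega : ¬ ((p.length : Nat) : Int) = -1)]
      congr 1
      simp only [PySem.Chars.slice_eq_listSlice]
      rw [PySem.List.slice_natCast, PySem.List.slice_from_natCast]
      rw [hdrop, List.take_left' (by simpa using hlen2)]
    · simp [hm]
  -- middle '*' contributes nothing; the rest shifts
  · rw [if_neg (by simp : ¬ ((0 + (p.length : Int), '*').2 = 'M')), List.nil_append]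
    have h01 : (0 + (p.length : Int) + 1) = ((p.length + 1 : Nat) : Int) := by push_cast; ring
    rw [h01]
    have h00 : (PySem.List.enumerate rest : List (Int × Char)) = PySem.List.enumerate rest ((0 : Nat) : Int) := by
      norm_num
    rw [h00]
    apply pv_flatMap_enum_shift
    intro k hk
    simp only [Nat.zero_add]
    by_cases hm : rest[k] = 'M'
    · simp only [hm, if_true]
      have hks : p.length + 1 + k ≤ s.length := by omega
      have hkr : k ≤ rest.length := le_of_lt hk
      rw [PySem.Chars.findFrom_natCast s ['*'] (p.length + 1 + k) hks,
          PySem.Chars.findFrom_natCast rest ['*'] k hkr]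
      have hdrop : s.drop (p.length + 1 + k) = rest.drop k := by
        rw [hs, show p ++ '*' :: rest = (p ++ ['*']) ++ rest by simp]
        rw [List.drop_append]
        rw [List.drop_eq_nil_of_le (by simp)]
        simp only [List.nil_append, List.length_append, List.length_cons, List.length_nil]
        congr 1
        omega
      rw [hdrop]
      by_cases hF : PySem.Chars.find (rest.drop k) ['*'] = -1
      · simp [hF]
      · have hF0 : 0 ≤ PySem.Chars.find (rest.drop k) ['*'] := by
          have := PySem.Chars.neg_one_le_find (rest.drop k) ['*']
          omega
        simp only [hF, if_false]
        rw [if_pos (by omega : ¬ ((p.length + 1 + k : Nat) : Int) + PySem.Chars.find (rest.drop k) ['*'] = -1)]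
        rw [if_pos (by omega : ¬ ((k : Nat) : Int) + PySem.Chars.find (rest.drop k) ['*'] = -1)]
        congr 1
        simp only [PySem.Chars.slice_eq_listSlice]
        rw [PySem.List.slice_toNat s (by omega) (by omega),
            PySem.List.slice_toNat rest (by omega) (by omega)]
        rw [show (((p.length + 1 + k : Nat) : Int)).toNat = p.length + 1 + k by omega, hdrop]
        rw [show ((k : Int)).toNat = k by omega]
        congr 1
        omega
    · simp [hm]

theorem pvAB (s : List Char) : pvA s = pvB s := by
  generalize hn : s.length = n
  induction n using Nat.strong_induction_on generalizing s with
  | _ n ih =>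
    by_cases h : '*' ∈ s
    · obtain ⟨p, rest, hp, rfl⟩ := pv_decomp _ h
      rw [pvA_decomp p rest hp, pvB_decomp p rest hp,
          ih rest.length (by subst hn; simp only [List.length_append, List.length_cons]; omega) rest rfl]
    · rw [pvA_no_star s h, pvB_no_star s h]

-- ===== VERDICT (by name: the statement is the Claim_ definition above) =====
theorem possible_proteins_spec : Claim_equal_possible_proteins := by
  intro a _
  unfold Spec_possible_proteins
  rw [portA, portB, pvAB]
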